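-- pv_equiv track=rewrite | github.com/eliottcassidy2000/math | 04-computation/scalar_m_from_consec.py | all_tournaments_canonical
-- ===== SOURCE A (Python) =====
-- from itertools import permutations, combinations
--
-- def all_tournaments_canonical(n):
--     """Yield one tournament per isomorphism class."""
--     edges = [(i,j) for i in range(n) for j in range(i+1,n)]
--     seen = set()
--     for bits in range(2**len(edges)):
--         A = [[0]*n for _ in range(n)]
--         for idx, (i,j) in enumerate(edges):
--             if (bits >> idx) & 1: A[i][j] = 1
--             else: A[j][i] = 1
--         key = tuple(tuple(row) for row in A)
--         min_key = key
--         for perm in permutations(range(n)):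
--             pkey = tuple(tuple(A[perm[i]][perm[j]] for j in range(n)) for i in range(n))
--             if pkey < min_key: min_key = pkey
--         if min_key in seen: continue
--         seen.add(min_key)
--         yield A
-- ===== SOURCE B (Python) =====
-- from itertools import permutations
--
-- def all_tournaments_canonical(n):
--     """Yield one tournament per isomorphism class.
--
--     Stateless orbit-minimality test: a tournament is yielded iff its bit
--     encoding is the smallest over all vertex relabelings, so no `seen`
--     set and no canonical-form minimization is kept; the matrix is built
--     cell-wise from the bits via an edge-index table."""
--     edges = [(i, j) for i in range(n) for j in range(i + 1, n)]
--     eidx = {e: k for k, e in enumerate(edges)}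
--
--     def cell(bits, i, j):
--         if i == j:
--             return 0
--         if i < j:
--             return (bits >> eidx[(i, j)]) & 1
--         return 1 - ((bits >> eidx[(j, i)]) & 1)
--
--     perms = list(permutations(range(n)))
--     for bits in range(2 ** len(edges)):
--         if all(sum(cell(bits, p[i], p[j]) << k for k, (i, j) in enumerate(edges)) >= bits
--                for p in perms):
--             yield [[cell(bits, i, j) for j in range(n)] for i in range(n)]
-- ===== Notes on version B (the rewrite author's own statement) =====
-- stated objective: alternative
-- what changed: Replaces the stateful canonical-form dedup (minimize every matrix over all permutations and record canonical keys in a seen set) by a stateless orbit-minimality test on the integer encoding (yield bits iff no relabeling gives a smaller bit encoding), and builds the matrix cell-wise from the bits through an edge-index table instead of A's edge-by-edge mutation loop.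
import Mathlib
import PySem

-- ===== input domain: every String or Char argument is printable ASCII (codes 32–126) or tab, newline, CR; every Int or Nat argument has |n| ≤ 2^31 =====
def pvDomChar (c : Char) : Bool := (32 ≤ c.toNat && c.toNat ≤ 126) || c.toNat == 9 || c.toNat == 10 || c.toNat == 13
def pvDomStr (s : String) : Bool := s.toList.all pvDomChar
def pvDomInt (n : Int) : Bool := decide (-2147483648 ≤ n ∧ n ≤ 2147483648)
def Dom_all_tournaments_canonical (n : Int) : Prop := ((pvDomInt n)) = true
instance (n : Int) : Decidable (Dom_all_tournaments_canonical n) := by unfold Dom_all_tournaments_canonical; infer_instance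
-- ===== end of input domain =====

-- B drops A's seen-set of canonical (permutation-minimal) matrices: it builds the matrix
-- cell-wise from the bits through an edge-index table and yields bits iff no relabeling
-- gives a smaller bit encoding (a stateless orbit-minimality test); same yielded list.

-- ===== PORT A =====
-- xs[i] ported as pyGetD: every index used is provably in range, so the total form is exact.
def pvGetI (xs : List Int) (i : Int) : Int := PySem.List.pyGetD xs i 0
def pvGetL (xs : List (List Int)) (i : Int) : List Int := PySem.List.pyGetD xs i []
-- range(n)
def pvR (n : Int) : List Int := PySem.List.pyRange 0 n 1
-- edges = [(i,j) for i in range(n) for j in range(i+1,n)]   (shared: both Pythons build it)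
def pvEdges (n : Int) : List (Int × Int) :=
  (pvR n).flatMap (fun i => (PySem.List.pyRange (i+1) n 1).map (fun j => (i, j)))
-- itertools.permutations(range(n))   (shared: both Pythons build it)
def pvPerms (n : Int) : List (List Int) :=
  PySem.List.permutations (pvR n) (pvR n).length
-- A's matrix build loop; (bits >> idx) & 1 is exactly (bits // 2**idx) % 2 in Python
def pvBuild (n : Int) (bits : Int) : List (List Int) :=
  (PySem.List.enumerate (pvEdges n)).foldl
    (fun A e =>
      if PySem.Int.mod (PySem.Int.floordiv bits ((2:Int) ^ e.1.toNat)) 2 = 1 then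
        PySem.List.pySetD A e.2.1 (PySem.List.pySetD (pvGetL A e.2.1) e.2.2 1)
      else
        PySem.List.pySetD A e.2.2 (PySem.List.pySetD (pvGetL A e.2.2) e.2.1 1))
    ((pvR n).map (fun _ => PySem.List.pyRepeat [(0:Int)] n))
-- pkey = tuple(tuple(A[perm[i]][perm[j]] for j in range(n)) for i in range(n))
def pvAct (n : Int) (A : List (List Int)) (p : List Int) : List (List Int) :=
  (pvR n).map (fun i =>
    (pvR n).map (fun j =>
      pvGetI (pvGetL A (pvGetI p i)) (pvGetI p j)))

def all_tournaments_canonical (n : Int) : List (List (List Int)) :=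
  ((PySem.List.pyRange 0 ((2:Int) ^ (pvEdges n).length) 1).foldl
    (fun st bits =>
      let A := pvBuild n bits
      let minKey := (pvPerms n).foldl
        (fun mk p => let pk := pvAct n A p; if pk < mk then pk else mk) A
      if PySem.Set.contains st.1 minKey then st
      else (PySem.Set.add st.1 minKey, st.2 ++ [A]))
    (PySem.Set.empty, [])).2

-- ===== PORT B =====
-- eidx = {e: k for k, e in enumerate(edges)}
def pvEIdx (n : Int) : PySem.Dict (Int × Int) Int :=
  (PySem.List.enumerate (pvEdges n)).foldl
    (fun d e => PySem.Dict.insert d e.2 e.1) PySem.Dict.empty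
-- cell(bits, i, j); (bits >> k) & 1 is exactly (bits // 2**k) % 2 in Python
def pvCell (eidx : PySem.Dict (Int × Int) Int) (bits i j : Int) : Int :=
  if i = j then 0
  else if i < j then
    PySem.Int.mod (PySem.Int.floordiv bits ((2:Int) ^ (PySem.Dict.getD eidx (i, j) 0).toNat)) 2
  else
    1 - PySem.Int.mod (PySem.Int.floordiv bits ((2:Int) ^ (PySem.Dict.getD eidx (j, i) 0).toNat)) 2
-- sum(cell(bits, p[i], p[j]) << k for k, (i, j) in enumerate(edges))
def pvEncB (n : Int) (eidx : PySem.Dict (Int × Int) Int) (bits : Int) (p : List Int) : Int :=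
  ((PySem.List.enumerate (pvEdges n)).map
    (fun e => pvCell eidx bits (pvGetI p e.2.1) (pvGetI p e.2.2) <<< e.1.toNat)).sum

def all_tournaments_canonical_alt (n : Int) : List (List (List Int)) :=
  let eidx := pvEIdx n
  (PySem.List.pyRange 0 ((2:Int) ^ (pvEdges n).length) 1).filterMap (fun bits =>
    if (pvPerms n).all (fun p => decide (bits ≤ pvEncB n eidx bits p)) then
      some ((pvR n).map (fun i => (pvR n).map (fun j => pvCell eidx bits i j)))
    else none)

-- ===== PRECONDITION & SPEC =====
def Spec_all_tournaments_canonical (n : Int) (out : List (List (List Int))) : Prop := out = all_tournaments_canonical_alt n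
instance (n : Int) (out : List (List (List Int))) : Decidable (Spec_all_tournaments_canonical n out) := by unfold Spec_all_tournaments_canonical; infer_instance

-- ===== CLAIM (what is proved, stated in full; the proofs are below) =====
def Claim_equal_all_tournaments_canonical : Prop := ∀ (n : Int), Dom_all_tournaments_canonical n → Spec_all_tournaments_canonical n (all_tournaments_canonical n)

-- ===== LEMMAS AND PROOFS =====

-- abbreviations used only in proofs
def pvN (n : Int) : Nat := (pvR n).length
def pvSh (n : Int) (X : List (List Int)) : Prop := X.length = pvN n ∧ ∀ r ∈ X, r.length = pvN n
def pvOrb (n : Int) (A : List (List Int)) : List (List (List Int)) := (pvPerms n).map (pvAct n A)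
def pvMK (n : Int) (A : List (List Int)) : List (List Int) :=
  (pvPerms n).foldl (fun mk p => let pk := pvAct n A p; if pk < mk then pk else mk) A
def pvComp (p q : List Int) : List Int := q.map (fun v => pvGetI p v)
def pvInv (n : Int) (p : List Int) : List Int := (pvR n).map (fun v => ((List.idxOf v p : Nat) : Int))
-- reading one cell of a matrix, bit k of an integer, B's cell-wise matrix, matrix bit-encoding
def pvCellR (M : List (List Int)) (a b : Int) : Int := pvGetI (pvGetL M a) b
def pvBit (b : Int) (k : Nat) : Int := PySem.Int.mod (PySem.Int.floordiv b ((2:Int) ^ k)) 2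
def pvMat (n : Int) (bits : Int) : List (List Int) :=
  (pvR n).map (fun i => (pvR n).map (fun j => pvCell (pvEIdx n) bits i j))
def pvVal : List Int → Int
  | [] => 0
  | c :: t => c + 2 * pvVal t
def pvEncM (n : Int) (M : List (List Int)) : Int :=
  pvVal ((pvEdges n).map (fun ed => pvCellR M ed.1 ed.2))
-- tournament matrices
def pvT (n : Int) (M : List (List Int)) : Prop :=
  pvSh n M ∧ (∀ a ∈ pvR n, pvCellR M a a = 0) ∧
  (∀ a b, a ∈ pvR n → b ∈ pvR n → a ≠ b →
    (pvCellR M a b = 0 ∨ pvCellR M a b = 1) ∧ pvCellR M a b + pvCellR M b a = 1)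

theorem pv_mem_permutations_of_perm {α : Type} [DecidableEq α] {xs p : List α}
    (h : p.Perm xs) : p ∈ PySem.List.permutations xs xs.length := by
  induction hlen : xs.length generalizing xs p with
  | zero =>
    have hx : xs = [] := List.length_eq_zero_iff.mp hlen
    have hp : p = [] := List.length_eq_zero_iff.mp (h.length_eq.trans hlen)
    subst hx; subst hp
    simp [PySem.List.permutations_zero]
  | succ m ih =>
    rcases p with _ | ⟨x, p'⟩
    · exact absurd (h.length_eq.trans hlen) (by simp)
    have hx : x ∈ xs := h.mem_iff.mp (by simp)
    have hi : xs.idxOf x < xs.length := List.idxOf_lt_length_of_mem hx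
    have hget : xs[xs.idxOf x] = x := List.getElem_idxOf hi
    have hp' : p'.Perm (xs.eraseIdx (xs.idxOf x)) := by
      have h2 := h.trans (List.getElem_cons_eraseIdx_perm hi).symm
      rw [hget] at h2
      exact h2.cons_inv
    have hlen' : (xs.eraseIdx (xs.idxOf x)).length = m := by
      rw [List.length_eraseIdx_of_lt hi, hlen]; omega
    rw [PySem.List.permutations_succ]
    apply List.mem_flatMap.mpr
    refine ⟨xs.idxOf x, by simp [List.mem_range]; omega, ?_⟩
    rw [List.getElem?_eq_getElem hi, hget]
    exact List.mem_map_of_mem (ih (p := p') (xs := xs.eraseIdx (List.idxOf x xs)) hp' hlen')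

-- index facts about range(n)
theorem pv_N_toNat {n : Int} : pvN n = n.toNat := by
  simp [pvN, pvR, PySem.List.length_pyRange_one]

theorem pv_R_get {n : Int} {k : Nat} (hk : k < (pvR n).length) : (pvR n)[k] = (k : Int) := by
  simp only [pvR] at *
  rw [PySem.List.getElem_pyRange_one]; omega

theorem pv_perm_of_mem_pvPerms {n : Int} {p : List Int} (h : p ∈ pvPerms n) : p.Perm (pvR n) :=
  PySem.List.perm_of_mem_permutations h

theorem pv_len_of_mem_pvPerms {n : Int} {p : List Int} (h : p ∈ pvPerms n) : p.length = pvN n :=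
  PySem.List.length_of_mem_permutations h

theorem pv_mem_R {n i : Int} : i ∈ pvR n ↔ 0 ≤ i ∧ i < n := by
  simp [pvR, PySem.List.mem_pyRange_one]

theorem pv_getI_R {n i : Int} (h0 : 0 ≤ i) (h1 : i < n) : pvGetI (pvR n) i = i := by
  have hlen : ((PySem.List.pyRange 0 n 1).length : Int) = n := by
    simp [PySem.List.length_pyRange_one]; omega
  unfold pvGetI pvR
  rw [PySem.List.pyGetD_eq_getElem _ _ h0 (by omega), PySem.List.getElem_pyRange_one]
  omega

theorem pv_getI_mem {n : Int} {p : List Int} (hp : p ∈ pvPerms n) {i : Int}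
    (h : i ∈ pvR n) : pvGetI p i ∈ pvR n := by
  obtain ⟨h0, h1⟩ := pv_mem_R.mp h
  have hp' := pv_perm_of_mem_pvPerms hp
  have hlen : ((p.length : Nat) : Int) = n := by
    rw [pv_len_of_mem_pvPerms hp]
    simp [pvN, pvR, PySem.List.length_pyRange_one]; omega
  have hmem : pvGetI p i ∈ p := by
    unfold pvGetI
    exact PySem.List.pyGetD_mem p 0 (by simp [PySem.Raise.InRange]; omega)
  exact hp'.mem_iff.mp hmem

theorem pv_act_entry {n : Int} (A : List (List Int)) (p : List Int) {i j : Int}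
    (hi : i ∈ pvR n) (hj : j ∈ pvR n) :
    pvCellR (pvAct n A p) i j = pvCellR A (pvGetI p i) (pvGetI p j) := by
  obtain ⟨hi0, hi1⟩ := pv_mem_R.mp hi
  obtain ⟨hj0, hj1⟩ := pv_mem_R.mp hj
  unfold pvCellR pvAct pvGetL pvGetI pvR
  rw [PySem.List.pyGetD_map_pyRange_of_nonneg _ _ _ _ hi0 hi1,
      PySem.List.pyGetD_map_pyRange_of_nonneg _ _ _ _ hj0 hj1]

theorem pv_comp_get {n : Int} {p q : List Int} (hq : q.length = pvN n) {i : Int}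
    (hi : i ∈ pvR n) : pvGetI (pvComp p q) i = pvGetI p (pvGetI q i) := by
  obtain ⟨h0, h1⟩ := pv_mem_R.mp hi
  have hlen : ((q.length : Nat) : Int) = n := by
    rw [hq]; simp [pvN, pvR, PySem.List.length_pyRange_one]; omega
  unfold pvComp pvGetI
  rw [PySem.List.pyGetD_eq_getElem _ _ h0 (by simp; omega),
      PySem.List.pyGetD_eq_getElem _ _ h0 (by omega)]
  simp

theorem pv_map_getI_R {n : Int} {p : List Int} (hp : p.length = pvN n) :
    (pvR n).map (fun v => pvGetI p v) = p := by
  apply List.ext_getElem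
  · simpa [pvN, pvR] using hp.symm
  · intro k hk hk'
    have hRk : (pvR n)[k] = (k : Int) := by
      simp only [pvR] at *
      rw [PySem.List.getElem_pyRange_one]; omega
    simp only [List.getElem_map, hRk]
    unfold pvGetI
    rw [PySem.List.pyGetD_natCast, List.getD_eq_getElem _ _ hk']

theorem pv_comp_mem {n : Int} {p q : List Int} (hp : p ∈ pvPerms n) (hq : q ∈ pvPerms n) :
    pvComp p q ∈ pvPerms n := by
  have hqp := pv_perm_of_mem_pvPerms hq
  have h2 : (pvR n).map (fun v => pvGetI p v) = p := pv_map_getI_R (pv_len_of_mem_pvPerms hp)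
  have hcp : (pvComp p q).Perm p := by
    unfold pvComp
    exact (hqp.map _).trans (by rw [h2])
  exact pv_mem_permutations_of_perm (hcp.trans (pv_perm_of_mem_pvPerms hp))

theorem pv_act_comp {n : Int} (A : List (List Int)) {p q : List Int}
    (hq : q ∈ pvPerms n) :
    pvAct n (pvAct n A p) q = pvAct n A (pvComp p q) := by
  have hqlen := pv_len_of_mem_pvPerms hq
  show (pvR n).map _ = (pvR n).map _
  apply List.map_congr_left
  intro i hi
  apply List.map_congr_left
  intro j hj
  have hi' : i ∈ pvR n := hi
  have hj' : j ∈ pvR n := hj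
  have hent := pv_act_entry (n := n) A p (pv_getI_mem hq hi') (pv_getI_mem hq hj')
  have h2i := pv_comp_get (n := n) (p := p) hqlen hi'
  have h2j := pv_comp_get (n := n) (p := p) hqlen hj'
  simp only [pvCellR, pvGetL, pvGetI] at hent h2i h2j ⊢
  rw [hent, h2i, h2j]

theorem pv_R_mem_perms {n : Int} : pvR n ∈ pvPerms n :=
  pv_mem_permutations_of_perm (List.Perm.refl _)

theorem pv_act_id {n : Int} {A : List (List Int)} (hA : pvSh n A) : pvAct n A (pvR n) = A := by
  obtain ⟨hlen, hrows⟩ := hA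
  apply List.ext_getElem
  · simpa [pvAct, pvN] using hlen.symm
  · intro k hk hk'
    have hkN : k < pvN n := by simpa [pvAct, pvN] using hk
    have hN : pvN n = n.toNat := pv_N_toNat
    simp only [pvAct, List.getElem_map]
    rw [pv_R_get (by simpa [pvN] using hkN)]
    rw [pv_getI_R (by omega) (by omega)]
    have hrowget : pvGetL A (k : Int) = A[k] := by
      unfold pvGetL
      rw [PySem.List.pyGetD_natCast]
      exact List.getD_eq_getElem _ _ hk'
    rw [hrowget]
    apply List.ext_getElem
    · simpa [pvN] using (hrows _ (List.getElem_mem hk')).symm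
    · intro l hl hl'
      have hlN : l < pvN n := by simpa [pvN] using hl
      simp only [List.getElem_map]
      rw [pv_R_get (by simpa [pvN] using hlN), pv_getI_R (by omega) (by omega)]
      unfold pvGetI
      rw [PySem.List.pyGetD_natCast]
      exact List.getD_eq_getElem _ _ hl'

theorem pv_inv_mem {n : Int} {p : List Int} (hp : p ∈ pvPerms n) : pvInv n p ∈ pvPerms n := by
  have hperm := pv_perm_of_mem_pvPerms hp
  have hplen : p.length = pvN n := pv_len_of_mem_pvPerms hp
  have hnodupR : (pvR n).Nodup := by
    simp [pvR, PySem.List.nodup_pyRange_one]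
  have hnodup : (pvInv n p).Nodup := by
    apply List.Nodup.map_on ?_ hnodupR
    intro u hu v hv heq
    have hu' : u ∈ p := hperm.mem_iff.mpr hu
    have hv' : v ∈ p := hperm.mem_iff.mpr hv
    have heq' : List.idxOf u p = List.idxOf v p := by exact_mod_cast heq
    have h1 : p[p.idxOf u]'(List.idxOf_lt_length_of_mem hu') = u := List.getElem_idxOf _
    have h2 : p[p.idxOf v]'(List.idxOf_lt_length_of_mem hv') = v := List.getElem_idxOf _
    rw [← h1, ← h2]
    congr 1
  have hsub : pvInv n p ⊆ pvR n := by
    intro x hx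
    simp only [pvInv, List.mem_map] at hx
    obtain ⟨v, hv, rfl⟩ := hx
    have hvp : v ∈ p := hperm.mem_iff.mpr hv
    have hidx : p.idxOf v < p.length := List.idxOf_lt_length_of_mem hvp
    have hN : pvN n = n.toNat := pv_N_toNat
    rw [pv_mem_R]
    have hlt : p.idxOf v < pvN n := hplen ▸ hidx
    omega
  have hlen2 : (pvInv n p).length = (pvR n).length := by simp [pvInv]
  have hsp : (pvInv n p).Subperm (pvR n) := List.subperm_of_subset hnodup hsub
  exact pv_mem_permutations_of_perm (hsp.perm_of_length_le (le_of_eq hlen2.symm))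

theorem pv_comp_inv {n : Int} {p : List Int} (hp : p ∈ pvPerms n) :
    pvComp p (pvInv n p) = pvR n := by
  have hperm := pv_perm_of_mem_pvPerms hp
  unfold pvComp pvInv
  rw [List.map_map]
  have : ∀ v ∈ pvR n, (((fun v => pvGetI p v) ∘ fun v => ((List.idxOf v p : Nat) : Int)) v) = v := by
    intro v hv
    have hvp : v ∈ p := hperm.mem_iff.mpr hv
    have hidx : p.idxOf v < p.length := List.idxOf_lt_length_of_mem hvp
    simp only [Function.comp_apply]
    unfold pvGetI
    rw [PySem.List.pyGetD_natCast, List.getD_eq_getElem _ _ hidx]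
    exact List.getElem_idxOf _
  rw [List.map_congr_left this, List.map_id']

theorem pv_foldl_preserve {α β : Type} {P : α → Prop} {f : α → β → α} {l : List β}
    {init : α} (h : ∀ a x, x ∈ l → P a → P (f a x)) (h0 : P init) : P (l.foldl f init) := by
  induction l generalizing init with
  | nil => exact h0
  | cons b t ih =>
    exact ih (fun a x hx => h a x (List.mem_cons_of_mem _ hx)) (h _ _ List.mem_cons_self h0)

theorem pv_mem_edges {n : Int} {e : Int × Int} (h : e ∈ pvEdges n) :
    0 ≤ e.1 ∧ e.1 < e.2 ∧ e.2 < n := by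
  simp only [pvEdges, List.mem_flatMap, List.mem_map] at h
  obtain ⟨a, ha, b, hb, heq⟩ := h
  have ha' := pv_mem_R.mp ha
  have hb' := (PySem.List.mem_pyRange_one).mp hb
  subst heq
  exact ⟨ha'.1, by omega, hb'.2⟩

theorem pv_edge_mem_R {n : Int} {e : Int × Int} (h : e ∈ pvEdges n) :
    e.1 ∈ pvR n ∧ e.2 ∈ pvR n := by
  obtain ⟨h1, h2, h3⟩ := pv_mem_edges h
  exact ⟨pv_mem_R.mpr ⟨h1, by omega⟩, pv_mem_R.mpr ⟨by omega, h3⟩⟩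

theorem pv_sh_set {n : Int} {A : List (List Int)} (hA : pvSh n A) {i j : Int} {v : Int}
    (hi : i ∈ pvR n) :
    pvSh n (PySem.List.pySetD A i (PySem.List.pySetD (pvGetL A i) j v)) := by
  obtain ⟨hi0, hi1⟩ := pv_mem_R.mp hi
  have hN : pvN n = n.toNat := pv_N_toNat
  have hiA : i < (A.length : Int) := by rw [hA.1]; omega
  rw [PySem.List.pySetD_of_nonneg A (PySem.List.pySetD (pvGetL A i) j v) hi0]
  constructor
  · simp [hA.1]
  · intro r hr
    rcases List.mem_or_eq_of_mem_set hr with h | rfl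
    · exact hA.2 _ h
    · rw [PySem.List.length_pySetD]
      have hrow : pvGetL A i ∈ A := by
        unfold pvGetL
        exact PySem.List.pyGetD_mem A [] (by simp [PySem.Raise.InRange]; omega)
      exact hA.2 _ hrow

theorem pv_sh_build (n bits : Int) : pvSh n (pvBuild n bits) := by
  unfold pvBuild
  apply pv_foldl_preserve
  · intro a e he ha
    have he2 : e.2 ∈ pvEdges n := by
      have h3 : e.2 ∈ (PySem.List.enumerate (pvEdges n) 0).map (·.2) := List.mem_map_of_mem he
      rwa [PySem.List.map_snd_enumerate] at h3
    obtain ⟨hi, hj⟩ := pv_edge_mem_R he2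
    split
    · exact pv_sh_set ha hi
    · exact pv_sh_set ha hj
  · constructor
    · simp [pvN]
    · intro r hr
      simp only [List.mem_map] at hr
      obtain ⟨_, _, rfl⟩ := hr
      rw [PySem.List.pyRepeat_singleton]
      simp [pv_N_toNat]

theorem pv_mk_eq_foldl_min {n : Int} (A : List (List Int)) :
    pvMK n A = (pvOrb n A).foldl min A := by
  unfold pvMK pvOrb
  have hstep : (fun (mk : List (List Int)) p => let pk := pvAct n A p; if pk < mk then pk else mk)
      = fun mk p => min mk (pvAct n A p) := by
    funext mk p
    show (if pvAct n A p < mk then pvAct n A p else mk) = _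
    rcases lt_or_ge (pvAct n A p) mk with h | h
    · simp [h, min_eq_right h.le]
    · simp [not_lt.mpr h, min_eq_left h]
  rw [hstep, List.foldl_map]

theorem pv_self_mem_orb {n : Int} {A : List (List Int)} (hA : pvSh n A) : A ∈ pvOrb n A := by
  exact List.mem_map.mpr ⟨pvR n, pv_R_mem_perms, pv_act_id hA⟩

theorem pv_mk_mem {n : Int} {A : List (List Int)} (hA : pvSh n A) : pvMK n A ∈ pvOrb n A := by
  rw [pv_mk_eq_foldl_min]
  rcases PySem.List.foldl_min_mem (pvOrb n A) A with h | h
  · rw [h]; exact pv_self_mem_orb hA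
  · exact h

theorem pv_mk_le {n : Int} (A : List (List Int)) : ∀ y ∈ pvOrb n A, pvMK n A ≤ y := by
  intro y hy
  rw [pv_mk_eq_foldl_min]
  exact (PySem.List.foldl_min_le (pvOrb n A) A).2 y hy

theorem pv_orb_sub {n : Int} {X Y : List (List Int)} (h : Y ∈ pvOrb n X) :
    pvOrb n Y ⊆ pvOrb n X := by
  obtain ⟨p, hp, rfl⟩ := List.mem_map.mp h
  intro Z hZ
  obtain ⟨q, hq, rfl⟩ := List.mem_map.mp hZ
  rw [pv_act_comp X hq]
  exact List.mem_map.mpr ⟨pvComp p q, pv_comp_mem hp hq, rfl⟩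

theorem pv_mem_orb_symm {n : Int} {X Y : List (List Int)} (hX : pvSh n X)
    (h : Y ∈ pvOrb n X) : X ∈ pvOrb n Y := by
  obtain ⟨p, hp, rfl⟩ := List.mem_map.mp h
  refine List.mem_map.mpr ⟨pvInv n p, pv_inv_mem hp, ?_⟩
  rw [pv_act_comp X (pv_inv_mem hp), pv_comp_inv hp]
  exact pv_act_id hX

theorem pv_mk_eq_iff {n : Int} {X A : List (List Int)} (hX : pvSh n X) (hA : pvSh n A) :
    pvMK n X = pvMK n A ↔ X ∈ pvOrb n A := by
  constructor
  · intro h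
    have h1 : pvMK n A ∈ pvOrb n X := h ▸ pv_mk_mem hX
    have h2 : pvMK n A ∈ pvOrb n A := pv_mk_mem hA
    exact pv_orb_sub h2 (pv_mem_orb_symm hX h1)
  · intro hXA
    have subXA : pvOrb n X ⊆ pvOrb n A := pv_orb_sub hXA
    have subAX : pvOrb n A ⊆ pvOrb n X := pv_orb_sub (pv_mem_orb_symm hA hXA)
    exact le_antisymm
      (pv_mk_le X _ (subAX (pv_mk_mem hA)))
      (pv_mk_le A _ (subXA (pv_mk_mem hX)))


-- edge-list structure
theorem pv_edges_nodup (n : Int) : (pvEdges n).Nodup := by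
  unfold pvEdges
  rw [List.nodup_flatMap]
  constructor
  · intro i _
    refine (PySem.List.nodup_pyRange_one _ _).map ?_
    intro a b h
    simpa using h
  · have h := PySem.List.nodup_pyRange_one (0:Int) n
    refine List.Pairwise.imp ?_ h
    intro a b hne
    simp only [List.disjoint_left]
    rintro ⟨x, y⟩ hx hy
    simp only [List.mem_map] at hx hy
    obtain ⟨j, _, hj⟩ := hx
    obtain ⟨j', _, hj'⟩ := hy
    apply hne
    have h1 : a = x := (Prod.mk.injEq ..).mp hj |>.1
    have h2 : b = x := (Prod.mk.injEq ..).mp hj' |>.1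
    omega

theorem pv_edges_mem {n a b : Int} (h0 : 0 ≤ a) (hab : a < b) (hbn : b < n) :
    (a, b) ∈ pvEdges n := by
  unfold pvEdges
  rw [List.mem_flatMap]
  refine ⟨a, pv_mem_R.mpr ⟨h0, by omega⟩, ?_⟩
  rw [List.mem_map]
  exact ⟨b, PySem.List.mem_pyRange_one.mpr ⟨by omega, hbn⟩, rfl⟩

-- the edge-index dictionary maps edge k to k
theorem pv_dfold_get?_not_mem (L : List (Int × Int)) (s : Int) (d : PySem.Dict (Int × Int) Int)
    (x : Int × Int) (hx : x ∉ L) :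
    ((PySem.List.enumerate L s).foldl (fun d e => PySem.Dict.insert d e.2 e.1) d).get? x = d.get? x := by
  induction L generalizing s d with
  | nil => simp [PySem.List.enumerate_nil]
  | cons a t ih =>
    rw [PySem.List.enumerate_cons, List.foldl_cons]
    rw [ih _ _ (fun h => hx (List.mem_cons_of_mem _ h))]
    exact PySem.Dict.get?_insert_of_ne _ _ (fun h => hx (h ▸ List.mem_cons_self))

theorem pv_dfold_get? (L : List (Int × Int)) (s : Int) (d : PySem.Dict (Int × Int) Int)
    (hL : L.Nodup) (k : Nat) (hk : k < L.length) :
    ((PySem.List.enumerate L s).foldl (fun d e => PySem.Dict.insert d e.2 e.1) d).get? L[k]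
      = some (s + k) := by
  induction L generalizing s d k with
  | nil => simp at hk
  | cons a t ih =>
    rw [PySem.List.enumerate_cons, List.foldl_cons]
    rcases k with _ | k
    · rw [List.getElem_cons_zero, pv_dfold_get?_not_mem _ _ _ _ (List.nodup_cons.mp hL).1]
      simpa using PySem.Dict.get?_insert_self d a s
    · rw [List.getElem_cons_succ, ih _ _ (List.nodup_cons.mp hL).2 k (by simpa using hk)]
      congr 1
      push_cast
      ring

theorem pv_eidx_getD {n : Int} {k : Nat} (hk : k < (pvEdges n).length) :
    PySem.Dict.getD (pvEIdx n) (pvEdges n)[k] 0 = (k : Int) := by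
  unfold pvEIdx
  rw [PySem.Dict.getD_eq_get?_getD,
      pv_dfold_get? (pvEdges n) 0 PySem.Dict.empty (pv_edges_nodup n) k hk]
  simp

-- bits and binary values
theorem pv_bit01 (b : Int) (k : Nat) : pvBit b k = 0 ∨ pvBit b k = 1 := by
  have h1 := PySem.Int.mod_nonneg (PySem.Int.floordiv b ((2:Int) ^ k)) (b := 2) (by norm_num)
  have h2 := PySem.Int.mod_lt (PySem.Int.floordiv b ((2:Int) ^ k)) (b := 2) (by norm_num)
  unfold pvBit
  omega

theorem pv_val_bounds (cs : List Int) (h01 : ∀ c ∈ cs, c = 0 ∨ c = 1) :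
    0 ≤ pvVal cs ∧ pvVal cs < 2 ^ cs.length := by
  induction cs with
  | nil => simp [pvVal]
  | cons c t ih =>
    obtain ⟨ih1, ih2⟩ := ih (fun x hx => h01 x (List.mem_cons_of_mem _ hx))
    have hc := h01 c List.mem_cons_self
    have hp : (2:Int) ^ (c :: t).length = 2 * 2 ^ t.length := by
      rw [List.length_cons, pow_succ]; ring
    simp only [pvVal]
    omega

theorem pv_bit_step (c v : Int) (hc : c = 0 ∨ c = 1) (hv : 0 ≤ v) :
    pvBit (c + 2 * v) 0 = c ∧ ∀ k : Nat, pvBit (c + 2 * v) (k + 1) = pvBit v k := by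
  constructor
  · unfold pvBit
    rw [PySem.Int.floordiv_eq_ediv_of_pos (by norm_num), PySem.Int.mod_eq_emod_of_pos (by norm_num)]
    simp only [pow_zero]
    omega
  · intro k
    unfold pvBit
    rw [PySem.Int.floordiv_eq_ediv_of_pos (by positivity), PySem.Int.mod_eq_emod_of_pos (by norm_num),
        PySem.Int.floordiv_eq_ediv_of_pos (by positivity), PySem.Int.mod_eq_emod_of_pos (by norm_num)]
    have hp : (2:Int) ^ (k+1) = 2 * 2 ^ k := by rw [pow_succ]; ring
    rw [hp, ← Int.ediv_ediv_of_nonneg (by norm_num : (0:Int) ≤ 2)]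
    have : (c + 2 * v) / 2 = v := by omega
    rw [this]

theorem pv_bit_val (cs : List Int) (h01 : ∀ c ∈ cs, c = 0 ∨ c = 1) (k : Nat)
    (hk : k < cs.length) : pvBit (pvVal cs) k = cs[k] := by
  induction cs generalizing k with
  | nil => simp at hk
  | cons c t ih =>
    have hc := h01 c List.mem_cons_self
    have ht : ∀ x ∈ t, x = 0 ∨ x = 1 := fun x hx => h01 x (List.mem_cons_of_mem _ hx)
    have hv := pv_val_bounds t ht
    have hstep := pv_bit_step c (pvVal t) hc hv.1
    rcases k with _ | k
    · simpa [pvVal] using hstep.1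
    · rw [List.getElem_cons_succ, ← ih ht k (by simpa using hk)]
      simpa [pvVal] using hstep.2 k

theorem pv_val_bits (m : Nat) (b : Int) (hb0 : 0 ≤ b) (hb : b < 2 ^ m) :
    pvVal ((List.range m).map (pvBit b)) = b := by
  induction m generalizing b with
  | zero => simp [pvVal] at hb ⊢; omega
  | succ m ih =>
    rw [List.range_succ_eq_map, List.map_cons, List.map_map]
    have hsplit : b % 2 = 0 ∨ b % 2 = 1 := by omega
    have hstep := pv_bit_step (b % 2) (b / 2) hsplit (by omega)
    have hmap : (List.range m).map (pvBit b ∘ Nat.succ) = (List.range m).map (pvBit (b / 2)) := by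
      apply List.map_congr_left
      intro k _
      have hb' : b = b % 2 + 2 * (b / 2) := by omega
      calc (pvBit b ∘ Nat.succ) k = pvBit (b % 2 + 2 * (b / 2)) (k + 1) := by
            simp only [Function.comp_apply, Nat.succ_eq_add_one]; rw [← hb']
        _ = pvBit (b / 2) k := hstep.2 k
    have hp : (2:Int) ^ (m+1) = 2 * 2 ^ m := by rw [pow_succ]; ring
    have hdb : b / 2 < 2 ^ m := by omega
    rw [hmap]
    have hb' : b = b % 2 + 2 * (b / 2) := by omega
    have hb0' : pvBit b 0 = b % 2 := by
      have h := hstep.1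
      rw [← hb'] at h
      exact h
    simp only [pvVal]
    rw [hb0', ih (b / 2) (by omega) hdb]
    omega

theorem pv_sum_shift {α : Type} (L : List α) (f : α → Int) (s : Int) (hs : 0 ≤ s) :
    ((PySem.List.enumerate L s).map (fun e => f e.2 <<< e.1.toNat)).sum
      = pvVal (L.map f) * 2 ^ s.toNat := by
  induction L generalizing s with
  | nil => simp [PySem.List.enumerate_nil, pvVal]
  | cons a t ih =>
    rw [PySem.List.enumerate_cons, List.map_cons, List.sum_cons, ih (s+1) (by omega), List.map_cons]
    have h1 : (s+1).toNat = s.toNat + 1 := by omega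
    simp only [Int.shiftLeft_eq_mul_pow]
    rw [h1, pow_succ]
    simp only [pvVal]
    push_cast
    ring


-- cell reads through one matrix update
theorem pv_set_getD_ne (M : List (List Int)) (i j a b : Nat) (v : Int)
    (hne : ¬(i = a ∧ j = b)) :
    ((M.set i ((M.getD i []).set j v)).getD a []).getD b 0 = (M.getD a []).getD b 0 := by
  by_cases hia : i = a
  · subst hia
    have hjb : j ≠ b := fun h => hne ⟨rfl, h⟩
    by_cases hlen : i < M.length
    · rw [List.getD_eq_getElem?_getD (l := M.set i _), List.getElem?_set_self hlen]
      simp only [Option.getD_some]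
      rw [List.getD_eq_getElem?_getD (l := (M.getD i []).set j v), List.getElem?_set_ne hjb,
          ← List.getD_eq_getElem?_getD]
    · rw [List.set_eq_of_length_le (by omega)]
  · rw [List.getD_eq_getElem?_getD (l := M.set i _), List.getElem?_set_ne hia,
        ← List.getD_eq_getElem?_getD]

theorem pv_cellR_set_ne (M : List (List Int)) (i j a b : Int) (v : Int)
    (hi : 0 ≤ i) (hj : 0 ≤ j) (ha : 0 ≤ a) (hb : 0 ≤ b)
    (hne : ¬(i = a ∧ j = b)) :
    pvCellR (PySem.List.pySetD M i (PySem.List.pySetD (pvGetL M i) j v)) a b = pvCellR M a b := by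
  unfold pvCellR pvGetL pvGetI
  rw [PySem.List.pySetD_of_nonneg _ _ hi, PySem.List.pySetD_of_nonneg _ _ hj,
      PySem.List.pyGetD_of_nonneg _ _ ha, PySem.List.pyGetD_of_nonneg _ _ hb,
      PySem.List.pyGetD_of_nonneg _ _ ha, PySem.List.pyGetD_of_nonneg _ _ hb,
      PySem.List.pyGetD_of_nonneg _ _ hi]
  exact pv_set_getD_ne M i.toNat j.toNat a.toNat b.toNat v (by omega)

theorem pv_cellR_set_self {n : Int} (M : List (List Int)) (hM : pvSh n M) {i j : Int} (v : Int)
    (hi : i ∈ pvR n) (hj : j ∈ pvR n) :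
    pvCellR (PySem.List.pySetD M i (PySem.List.pySetD (pvGetL M i) j v)) i j = v := by
  obtain ⟨hi0, hi1⟩ := pv_mem_R.mp hi
  obtain ⟨hj0, hj1⟩ := pv_mem_R.mp hj
  have hN : pvN n = n.toNat := pv_N_toNat
  have hilen : i.toNat < M.length := by rw [hM.1]; omega
  have hrow : M.getD i.toNat [] = M[i.toNat] := List.getD_eq_getElem M [] hilen
  have hrlen : j.toNat < (M.getD i.toNat []).length := by
    rw [hrow, hM.2 _ (List.getElem_mem hilen)]; omega
  unfold pvCellR pvGetL pvGetI
  rw [PySem.List.pySetD_of_nonneg _ _ hi0, PySem.List.pySetD_of_nonneg _ _ hj0,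
      PySem.List.pyGetD_of_nonneg _ _ hi0, PySem.List.pyGetD_of_nonneg _ _ hj0,
      PySem.List.pyGetD_of_nonneg _ _ hi0]
  rw [List.getD_eq_getElem?_getD (l := M.set i.toNat _), List.getElem?_set_self hilen]
  simp only [Option.getD_some]
  rw [List.getD_eq_getElem?_getD, List.getElem?_set_self hrlen]
  rfl

-- A's build loop, named for the proofs
def pvStep (bits : Int) : List (List Int) → (Int × Int × Int) → List (List Int) :=
  fun A e =>
    if PySem.Int.mod (PySem.Int.floordiv bits ((2:Int) ^ e.1.toNat)) 2 = 1 then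
      PySem.List.pySetD A e.2.1 (PySem.List.pySetD (pvGetL A e.2.1) e.2.2 1)
    else
      PySem.List.pySetD A e.2.2 (PySem.List.pySetD (pvGetL A e.2.2) e.2.1 1)
def pvInit (n : Int) : List (List Int) := (pvR n).map (fun _ => PySem.List.pyRepeat [(0:Int)] n)

theorem pv_build_eq_foldl (n bits : Int) :
    pvBuild n bits = (PySem.List.enumerate (pvEdges n)).foldl (pvStep bits) (pvInit n) := rfl

-- cells not set by a run of A's build loop keep their value
theorem pv_fold_untouched (bits : Int) (L : List (Int × Int × Int)) (M : List (List Int))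
    (a b : Int) (ha : 0 ≤ a) (hb : 0 ≤ b)
    (h : ∀ q ∈ L, 0 ≤ q.2.1 ∧ 0 ≤ q.2.2 ∧ ¬(q.2.1 = a ∧ q.2.2 = b) ∧ ¬(q.2.2 = a ∧ q.2.1 = b)) :
    pvCellR (L.foldl (pvStep bits) M) a b = pvCellR M a b := by
  induction L generalizing M with
  | nil => rfl
  | cons q t ih =>
    rw [List.foldl_cons]
    obtain ⟨h1, h2, h3, h4⟩ := h q List.mem_cons_self
    rw [ih _ (fun x hx => h x (List.mem_cons_of_mem _ hx))]
    unfold pvStep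
    split
    · exact pv_cellR_set_ne M q.2.1 q.2.2 a b 1 h1 h2 ha hb h3
    · exact pv_cellR_set_ne M q.2.2 q.2.1 a b 1 h2 h1 ha hb h4

-- shape through a run of A's build loop
theorem pv_sh_fold {n : Int} (bits : Int) (L : List (Int × Int × Int)) (M : List (List Int))
    (hL : ∀ q ∈ L, q.2 ∈ pvEdges n) (hM : pvSh n M) :
    pvSh n (L.foldl (pvStep bits) M) := by
  apply pv_foldl_preserve
  · intro A q hq hA
    obtain ⟨hi, hj⟩ := pv_edge_mem_R (hL q hq)
    unfold pvStep
    split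
    · exact pv_sh_set hA hi
    · exact pv_sh_set hA hj
  · exact hM

theorem pv_sh_init (n : Int) : pvSh n (pvInit n) := by
  constructor
  · simp [pvInit, pvN]
  · intro r hr
    simp only [pvInit, List.mem_map] at hr
    obtain ⟨_, _, rfl⟩ := hr
    rw [PySem.List.pyRepeat_singleton]
    simp [pv_N_toNat]

theorem pv_init_cell {n a b : Int} (h0a : 0 ≤ a) (han : a < n) (h0b : 0 ≤ b) (hbn : b < n) :
    pvCellR (pvInit n) a b = 0 := by
  unfold pvCellR pvGetL pvGetI pvInit pvR
  rw [PySem.List.pyGetD_map_pyRange_of_nonneg _ _ _ _ h0a han, PySem.List.pyRepeat_singleton,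
      PySem.List.pyGetD_of_nonneg _ _ h0b]
  rw [List.getD_eq_getElem?_getD, List.getElem?_replicate]
  split <;> rfl

theorem pv_snd_mem_enum {α : Type} {q : Int × α} {xs : List α} {s : Int}
    (h : q ∈ PySem.List.enumerate xs s) : q.2 ∈ xs := by
  have h3 : q.2 ∈ (PySem.List.enumerate xs s).map (·.2) := List.mem_map_of_mem h
  rwa [PySem.List.map_snd_enumerate] at h3

theorem pv_mem_take_ne {α : Type} {E : List α} (hnd : E.Nodup) {k : Nat} (hk : k < E.length)
    {x : α} (hx : x ∈ E.take k) : x ≠ E[k] := by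
  obtain ⟨i, hi, hgi⟩ := List.mem_iff_getElem.mp hx
  simp only [List.length_take] at hi
  rw [List.getElem_take] at hgi
  intro hxe
  rw [hxe] at hgi
  have := (List.Nodup.getElem_inj_iff hnd).mp hgi
  omega

theorem pv_mem_drop_ne {α : Type} {E : List α} (hnd : E.Nodup) {k : Nat} (hk : k < E.length)
    {x : α} (hx : x ∈ E.drop (k+1)) : x ≠ E[k] := by
  obtain ⟨i, hi, hgi⟩ := List.mem_iff_getElem.mp hx
  simp only [List.length_drop] at hi
  rw [List.getElem_drop] at hgi
  intro hxe
  rw [hxe] at hgi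
  have := (List.Nodup.getElem_inj_iff hnd).mp hgi
  omega

theorem pv_edge_cond {n : Int} {q : Int × Int} (hq : q ∈ pvEdges n) {i j : Int}
    (hij : i < j) (hne : q ≠ (i, j)) :
    (¬(q.1 = i ∧ q.2 = j) ∧ ¬(q.2 = i ∧ q.1 = j)) ∧
    (¬(q.1 = j ∧ q.2 = i) ∧ ¬(q.2 = j ∧ q.1 = i)) := by
  obtain ⟨h0, hlt, hn⟩ := pv_mem_edges hq
  have hprod : ¬(q.1 = i ∧ q.2 = j) := by
    rintro ⟨e1, e2⟩
    exact hne (Prod.ext e1 e2)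
  exact ⟨⟨hprod, by omega⟩, ⟨by omega, fun ⟨e1, e2⟩ => hne (Prod.ext e2 e1)⟩⟩

theorem pv_build_diag {n : Int} (bits : Int) {a : Int} (ha : a ∈ pvR n) :
    pvCellR (pvBuild n bits) a a = 0 := by
  obtain ⟨h0, h1⟩ := pv_mem_R.mp ha
  rw [pv_build_eq_foldl]
  rw [pv_fold_untouched bits _ _ a a h0 h0 ?_]
  · exact pv_init_cell h0 h1 h0 h1
  · intro q hq
    obtain ⟨hq0, hqlt, hqn⟩ := pv_mem_edges (pv_snd_mem_enum hq)
    exact ⟨hq0, by omega, by omega, by omega⟩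

theorem pv_build_cell {n : Int} (bits : Int) {k : Nat} (hk : k < (pvEdges n).length) :
    pvCellR (pvBuild n bits) (pvEdges n)[k].1 (pvEdges n)[k].2 = pvBit bits k ∧
    pvCellR (pvBuild n bits) (pvEdges n)[k].2 (pvEdges n)[k].1 = 1 - pvBit bits k := by
  have hnd := pv_edges_nodup n
  obtain ⟨hi0, hij, hjn⟩ := pv_mem_edges (List.getElem_mem hk)
  have hiR : (pvEdges n)[k].1 ∈ pvR n := (pv_edge_mem_R (List.getElem_mem hk)).1
  have hjR : (pvEdges n)[k].2 ∈ pvR n := (pv_edge_mem_R (List.getElem_mem hk)).2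
  have hsplit : pvEdges n = (pvEdges n).take k ++ (pvEdges n)[k] :: (pvEdges n).drop (k+1) := by
    conv_lhs => rw [← List.take_append_drop k (pvEdges n)]
    rw [List.getElem_cons_drop]
  have htl : ((pvEdges n).take k).length = k := by
    rw [List.length_take]; omega
  have henum : PySem.List.enumerate (pvEdges n) 0
      = PySem.List.enumerate ((pvEdges n).take k) 0
        ++ ((k : Int), (pvEdges n)[k]) :: PySem.List.enumerate ((pvEdges n).drop (k+1)) ((k : Int) + 1) := by
    conv_lhs => rw [hsplit]
    rw [PySem.List.enumerate_append, PySem.List.enumerate_cons, htl]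
    norm_num
  have hbuild : pvBuild n bits
      = (PySem.List.enumerate ((pvEdges n).drop (k+1)) ((k : Int) + 1)).foldl (pvStep bits)
          (pvStep bits
            ((PySem.List.enumerate ((pvEdges n).take k) 0).foldl (pvStep bits) (pvInit n))
            ((k : Int), (pvEdges n)[k])) := by
    rw [pv_build_eq_foldl, henum, List.foldl_append, List.foldl_cons]
  have hM1sh : pvSh n ((PySem.List.enumerate ((pvEdges n).take k) 0).foldl (pvStep bits) (pvInit n)) :=
    pv_sh_fold bits _ _ (fun q hq => List.take_subset _ _ (pv_snd_mem_enum hq)) (pv_sh_init n)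
  have hcondT : ∀ q ∈ PySem.List.enumerate ((pvEdges n).take k) 0,
      0 ≤ q.2.1 ∧ 0 ≤ q.2.2 ∧
      ((¬(q.2.1 = (pvEdges n)[k].1 ∧ q.2.2 = (pvEdges n)[k].2) ∧
        ¬(q.2.2 = (pvEdges n)[k].1 ∧ q.2.1 = (pvEdges n)[k].2)) ∧
       (¬(q.2.1 = (pvEdges n)[k].2 ∧ q.2.2 = (pvEdges n)[k].1) ∧
        ¬(q.2.2 = (pvEdges n)[k].2 ∧ q.2.1 = (pvEdges n)[k].1))) := by
    intro q hq
    have hqe : q.2 ∈ pvEdges n := List.take_subset _ _ (pv_snd_mem_enum hq)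
    have hne : q.2 ≠ ((pvEdges n)[k].1, (pvEdges n)[k].2) := by
      have := pv_mem_take_ne hnd hk (pv_snd_mem_enum hq)
      simpa using this
    obtain ⟨hq0, hqlt, hqn⟩ := pv_mem_edges hqe
    exact ⟨hq0, by omega, pv_edge_cond hqe hij hne⟩
  have hcondD : ∀ q ∈ PySem.List.enumerate ((pvEdges n).drop (k+1)) ((k : Int) + 1),
      0 ≤ q.2.1 ∧ 0 ≤ q.2.2 ∧
      ((¬(q.2.1 = (pvEdges n)[k].1 ∧ q.2.2 = (pvEdges n)[k].2) ∧
        ¬(q.2.2 = (pvEdges n)[k].1 ∧ q.2.1 = (pvEdges n)[k].2)) ∧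
       (¬(q.2.1 = (pvEdges n)[k].2 ∧ q.2.2 = (pvEdges n)[k].1) ∧
        ¬(q.2.2 = (pvEdges n)[k].2 ∧ q.2.1 = (pvEdges n)[k].1))) := by
    intro q hq
    have hqe : q.2 ∈ pvEdges n := List.drop_subset _ _ (pv_snd_mem_enum hq)
    have hne : q.2 ≠ ((pvEdges n)[k].1, (pvEdges n)[k].2) := by
      have := pv_mem_drop_ne hnd hk (pv_snd_mem_enum hq)
      simpa using this
    obtain ⟨hq0, hqlt, hqn⟩ := pv_mem_edges hqe
    exact ⟨hq0, by omega, pv_edge_cond hqe hij hne⟩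
  have hm1a : pvCellR ((PySem.List.enumerate ((pvEdges n).take k) 0).foldl (pvStep bits) (pvInit n))
      (pvEdges n)[k].1 (pvEdges n)[k].2 = 0 := by
    rw [pv_fold_untouched bits _ _ _ _ (by omega) (by omega)
      (fun q hq => ⟨(hcondT q hq).1, (hcondT q hq).2.1, (hcondT q hq).2.2.1⟩)]
    exact pv_init_cell (by omega) (by omega) (by omega) (by omega)
  have hm1b : pvCellR ((PySem.List.enumerate ((pvEdges n).take k) 0).foldl (pvStep bits) (pvInit n))
      (pvEdges n)[k].2 (pvEdges n)[k].1 = 0 := by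
    rw [pv_fold_untouched bits _ _ _ _ (by omega) (by omega)
      (fun q hq => ⟨(hcondT q hq).1, (hcondT q hq).2.1, (hcondT q hq).2.2.2⟩)]
    exact pv_init_cell (by omega) (by omega) (by omega) (by omega)
  have hb01 := pv_bit01 bits k
  have hstep : pvStep bits
        ((PySem.List.enumerate ((pvEdges n).take k) 0).foldl (pvStep bits) (pvInit n))
        ((k : Int), (pvEdges n)[k])
      = if pvBit bits k = 1 then
          PySem.List.pySetD ((PySem.List.enumerate ((pvEdges n).take k) 0).foldl (pvStep bits) (pvInit n)) (pvEdges n)[k].1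
            (PySem.List.pySetD (pvGetL ((PySem.List.enumerate ((pvEdges n).take k) 0).foldl (pvStep bits) (pvInit n)) (pvEdges n)[k].1) (pvEdges n)[k].2 1)
        else
          PySem.List.pySetD ((PySem.List.enumerate ((pvEdges n).take k) 0).foldl (pvStep bits) (pvInit n)) (pvEdges n)[k].2
            (PySem.List.pySetD (pvGetL ((PySem.List.enumerate ((pvEdges n).take k) 0).foldl (pvStep bits) (pvInit n)) (pvEdges n)[k].2) (pvEdges n)[k].1 1) := by
    show (if pvBit bits ((k : Int)).toNat = 1 then _ else _) = _
    rw [show ((k : Int)).toNat = k by omega]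
  constructor
  · rw [hbuild,
      pv_fold_untouched bits _ _ _ _ (by omega) (by omega)
        (fun q hq => ⟨(hcondD q hq).1, (hcondD q hq).2.1, (hcondD q hq).2.2.1⟩),
      hstep]
    split
    · rename_i hbit
      rw [hbit]
      exact pv_cellR_set_self _ hM1sh 1 hiR hjR
    · rename_i hbit
      have h0 : pvBit bits k = 0 := by omega
      rw [h0]
      rw [pv_cellR_set_ne _ _ _ _ _ 1 (by omega) (by omega) (by omega) (by omega) (by omega)]
      exact hm1a
  · rw [hbuild,
      pv_fold_untouched bits _ _ _ _ (by omega) (by omega)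
        (fun q hq => ⟨(hcondD q hq).1, (hcondD q hq).2.1, (hcondD q hq).2.2.2⟩),
      hstep]
    split
    · rename_i hbit
      rw [hbit]
      rw [pv_cellR_set_ne _ _ _ _ _ 1 (by omega) (by omega) (by omega) (by omega) (by omega)]
      rw [hm1b]
      ring
    · rename_i hbit
      have h0 : pvBit bits k = 0 := by omega
      rw [h0]
      have := pv_cellR_set_self _ hM1sh 1 hjR hiR
      rw [this]
      ring

-- B's cell function: values on an edge, diagonal, complement
theorem pv_cell_edge {n : Int} (bits : Int) {k : Nat} (hk : k < (pvEdges n).length) :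
    pvCell (pvEIdx n) bits (pvEdges n)[k].1 (pvEdges n)[k].2 = pvBit bits k := by
  obtain ⟨h0, hij, hn⟩ := pv_mem_edges (List.getElem_mem hk)
  unfold pvCell
  rw [if_neg (by omega), if_pos hij]
  show pvBit bits (PySem.Dict.getD (pvEIdx n) ((pvEdges n)[k].1, (pvEdges n)[k].2) 0).toNat = _
  rw [show ((pvEdges n)[k].1, (pvEdges n)[k].2) = (pvEdges n)[k] from rfl, pv_eidx_getD hk]
  norm_num

theorem pv_cell_edge' {n : Int} (bits : Int) {k : Nat} (hk : k < (pvEdges n).length) :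
    pvCell (pvEIdx n) bits (pvEdges n)[k].2 (pvEdges n)[k].1 = 1 - pvBit bits k := by
  obtain ⟨h0, hij, hn⟩ := pv_mem_edges (List.getElem_mem hk)
  unfold pvCell
  rw [if_neg (by omega), if_neg (by omega)]
  show 1 - pvBit bits (PySem.Dict.getD (pvEIdx n) ((pvEdges n)[k].1, (pvEdges n)[k].2) 0).toNat = _
  rw [show ((pvEdges n)[k].1, (pvEdges n)[k].2) = (pvEdges n)[k] from rfl, pv_eidx_getD hk]
  norm_num

theorem pv_cell_diag (eidx : PySem.Dict (Int × Int) Int) (bits a : Int) :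
    pvCell eidx bits a a = 0 := by
  simp [pvCell]

theorem pv_cell_props (eidx : PySem.Dict (Int × Int) Int) (bits : Int) {i j : Int} (hne : i ≠ j) :
    (pvCell eidx bits i j = 0 ∨ pvCell eidx bits i j = 1) ∧
    pvCell eidx bits i j + pvCell eidx bits j i = 1 := by
  rcases lt_trichotomy i j with h | h | h
  · unfold pvCell
    rw [if_neg hne, if_pos h, if_neg (Ne.symm hne), if_neg (by omega)]
    exact ⟨pv_bit01 _ _, by ring⟩
  · exact absurd h hne
  · unfold pvCell
    rw [if_neg hne, if_neg (by omega), if_neg (Ne.symm hne), if_pos h]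
    refine ⟨?_, by ring⟩
    have h1 := pv_bit01 bits (PySem.Dict.getD eidx (j, i) 0).toNat
    unfold pvBit at h1
    omega

-- extensionality for cell-wise matrices
theorem pv_cellR_getElem {n : Int} {T : List (List Int)} (hT : pvSh n T) {r c : Nat}
    (hr : r < T.length) (hc : c < T[r].length) :
    pvCellR T (r : Int) (c : Int) = T[r][c] := by
  unfold pvCellR pvGetL pvGetI
  rw [PySem.List.pyGetD_natCast, PySem.List.pyGetD_natCast, List.getD_eq_getElem _ _ hr,
      List.getD_eq_getElem _ _ hc]

theorem pv_mat_ext {n : Int} {T : List (List Int)} (hT : pvSh n T)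
    (F : Int → Int → Int) (h : ∀ a b, a ∈ pvR n → b ∈ pvR n → F a b = pvCellR T a b) :
    (pvR n).map (fun i => (pvR n).map (fun j => F i j)) = T := by
  have hN : pvN n = n.toNat := pv_N_toNat
  apply List.ext_getElem
  · simpa [pvN] using hT.1.symm
  · intro k hk hk'
    have hkN : k < pvN n := by simpa [pvN] using hk
    simp only [List.getElem_map]
    rw [pv_R_get (by simpa [pvN] using hkN)]
    apply List.ext_getElem
    · simpa [pvN] using (hT.2 _ (List.getElem_mem hk')).symm
    · intro l hl hl'
      have hlN : l < pvN n := by simpa [pvN] using hl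
      simp only [List.getElem_map]
      rw [pv_R_get (by simpa [pvN] using hlN)]
      rw [h _ _ (pv_mem_R.mpr ⟨by omega, by omega⟩) (pv_mem_R.mpr ⟨by omega, by omega⟩)]
      exact pv_cellR_getElem hT hk' hl'

-- A's built matrix IS B's cell-wise matrix
theorem pv_build_eq_mat (n bits : Int) : pvBuild n bits = pvMat n bits := by
  symm
  apply pv_mat_ext (pv_sh_build n bits)
  intro a b haR hbR
  obtain ⟨ha0, han⟩ := pv_mem_R.mp haR
  obtain ⟨hb0, hbn⟩ := pv_mem_R.mp hbR
  rcases lt_trichotomy a b with hab | hab | hab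
  · obtain ⟨k, hkl, hke⟩ := List.mem_iff_getElem.mp (pv_edges_mem ha0 hab hbn)
    have h1 : (pvEdges n)[k].1 = a := by rw [hke]
    have h2 : (pvEdges n)[k].2 = b := by rw [hke]
    rw [← h1, ← h2, pv_cell_edge bits hkl, (pv_build_cell bits hkl).1]
  · rw [hab, pv_cell_diag, pv_build_diag bits hbR]
  · obtain ⟨k, hkl, hke⟩ := List.mem_iff_getElem.mp (pv_edges_mem hb0 hab han)
    have h1 : (pvEdges n)[k].1 = b := by rw [hke]
    have h2 : (pvEdges n)[k].2 = a := by rw [hke]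
    rw [← h1, ← h2, pv_cell_edge' bits hkl, (pv_build_cell bits hkl).2]

theorem pv_sh_mat (n bits : Int) : pvSh n (pvMat n bits) := by
  rw [← pv_build_eq_mat]
  exact pv_sh_build n bits

theorem pv_mat_cellR {n : Int} (bits : Int) {a b : Int} (ha : a ∈ pvR n) (hb : b ∈ pvR n) :
    pvCellR (pvMat n bits) a b = pvCell (pvEIdx n) bits a b := by
  obtain ⟨ha0, han⟩ := pv_mem_R.mp ha
  obtain ⟨hb0, hbn⟩ := pv_mem_R.mp hb
  unfold pvCellR pvGetL pvGetI pvMat pvR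
  rw [PySem.List.pyGetD_map_pyRange_of_nonneg _ _ _ _ ha0 han,
      PySem.List.pyGetD_map_pyRange_of_nonneg _ _ _ _ hb0 hbn]

theorem pv_T_mat (n bits : Int) : pvT n (pvMat n bits) := by
  refine ⟨pv_sh_mat n bits, ?_, ?_⟩
  · intro a ha
    rw [pv_mat_cellR bits ha ha]
    exact pv_cell_diag _ _ _
  · intro a b ha hb hne
    rw [pv_mat_cellR bits ha hb, pv_mat_cellR bits hb ha]
    exact pv_cell_props _ bits hne

theorem pv_getI_inj {n : Int} {p : List Int} (hp : p ∈ pvPerms n) {a b : Int}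
    (ha : a ∈ pvR n) (hb : b ∈ pvR n) (hne : a ≠ b) : pvGetI p a ≠ pvGetI p b := by
  obtain ⟨ha0, han⟩ := pv_mem_R.mp ha
  obtain ⟨hb0, hbn⟩ := pv_mem_R.mp hb
  have hnd : p.Nodup := ((pv_perm_of_mem_pvPerms hp).nodup_iff).mpr
    (by simp [pvR, PySem.List.nodup_pyRange_one])
  have hlen : p.length = pvN n := pv_len_of_mem_pvPerms hp
  have hN : pvN n = n.toNat := pv_N_toNat
  unfold pvGetI
  rw [PySem.List.pyGetD_eq_getElem _ _ ha0 (by omega), PySem.List.pyGetD_eq_getElem _ _ hb0 (by omega)]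
  intro h
  have := (List.Nodup.getElem_inj_iff hnd).mp h
  omega

theorem pv_T_act {n : Int} {A : List (List Int)} (hA : pvT n A) {p : List Int}
    (hp : p ∈ pvPerms n) : pvT n (pvAct n A p) := by
  refine ⟨⟨by simp [pvAct, pvN], ?_⟩, ?_, ?_⟩
  · intro r hr
    simp only [pvAct, List.mem_map] at hr
    obtain ⟨_, _, rfl⟩ := hr
    simp [pvN]
  · intro a ha
    rw [pv_act_entry A p ha ha]
    exact hA.2.1 _ (pv_getI_mem hp ha)
  · intro a b ha hb hne
    rw [pv_act_entry A p ha hb, pv_act_entry A p hb ha]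
    exact hA.2.2 _ _ (pv_getI_mem hp ha) (pv_getI_mem hp hb) (pv_getI_inj hp ha hb hne)

-- the bit encoding of a matrix
theorem pv_encM_cs01 {n : Int} {T : List (List Int)} (hT : pvT n T) :
    ∀ c ∈ (pvEdges n).map (fun ed => pvCellR T ed.1 ed.2), c = 0 ∨ c = 1 := by
  intro c hc
  obtain ⟨ed, hed, rfl⟩ := List.mem_map.mp hc
  obtain ⟨h1R, h2R⟩ := pv_edge_mem_R hed
  obtain ⟨_, hlt, _⟩ := pv_mem_edges hed
  exact (hT.2.2 _ _ h1R h2R (by omega)).1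

theorem pv_encM_bounds {n : Int} {T : List (List Int)} (hT : pvT n T) :
    0 ≤ pvEncM n T ∧ pvEncM n T < 2 ^ (pvEdges n).length := by
  have h := pv_val_bounds _ (pv_encM_cs01 hT)
  rw [List.length_map] at h
  exact h

-- B's per-permutation sum is the encoding of the permuted matrix
theorem pv_encB_eq_encM {n : Int} (bits : Int) {p : List Int} (hp : p ∈ pvPerms n) :
    pvEncB n (pvEIdx n) bits p = pvEncM n (pvAct n (pvMat n bits) p) := by
  unfold pvEncB pvEncM
  rw [pv_sum_shift (pvEdges n)
    (fun ed => pvCell (pvEIdx n) bits (pvGetI p ed.1) (pvGetI p ed.2)) 0 le_rfl]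
  norm_num
  congr 1
  apply List.map_congr_left
  intro ed hed
  obtain ⟨h1R, h2R⟩ := pv_edge_mem_R hed
  rw [pv_act_entry _ p h1R h2R,
      pv_mat_cellR bits (pv_getI_mem hp h1R) (pv_getI_mem hp h2R)]

-- decode ∘ encode is the identity on tournament matrices
theorem pv_mat_encM {n : Int} {T : List (List Int)} (hT : pvT n T) :
    pvMat n (pvEncM n T) = T := by
  apply pv_mat_ext hT.1
  intro a b haR hbR
  obtain ⟨ha0, han⟩ := pv_mem_R.mp haR
  obtain ⟨hb0, hbn⟩ := pv_mem_R.mp hbR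
  have hcs := pv_encM_cs01 hT
  rcases lt_trichotomy a b with hab | hab | hab
  · obtain ⟨k, hkl, hke⟩ := List.mem_iff_getElem.mp (pv_edges_mem ha0 hab hbn)
    have h1 : (pvEdges n)[k].1 = a := by rw [hke]
    have h2 : (pvEdges n)[k].2 = b := by rw [hke]
    rw [← h1, ← h2, pv_cell_edge _ hkl]
    unfold pvEncM
    rw [pv_bit_val _ hcs k (by simpa using hkl)]
    simp
  · rw [hab, pv_cell_diag]
    exact (hT.2.1 _ hbR).symm
  · obtain ⟨k, hkl, hke⟩ := List.mem_iff_getElem.mp (pv_edges_mem hb0 hab han)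
    have h1 : (pvEdges n)[k].1 = b := by rw [hke]
    have h2 : (pvEdges n)[k].2 = a := by rw [hke]
    rw [← h1, ← h2, pv_cell_edge' _ hkl]
    unfold pvEncM
    rw [pv_bit_val _ hcs k (by simpa using hkl)]
    simp only [List.getElem_map]
    have hcomp := (hT.2.2 _ _ (pv_edge_mem_R (List.getElem_mem hkl)).1
      (pv_edge_mem_R (List.getElem_mem hkl)).2
      (by obtain ⟨_, hlt, _⟩ := pv_mem_edges (List.getElem_mem hkl); omega)).2
    rw [h1, h2] at hcomp ⊢
    omega

-- encode ∘ decode is the identity on bit patterns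
theorem pv_encM_mat {n : Int} (b : Int) (hb0 : 0 ≤ b) (hb : b < 2 ^ (pvEdges n).length) :
    pvEncM n (pvMat n b) = b := by
  unfold pvEncM
  have hmap : (pvEdges n).map (fun ed => pvCellR (pvMat n b) ed.1 ed.2)
      = (List.range (pvEdges n).length).map (pvBit b) := by
    apply List.ext_getElem (by simp)
    intro k hk hk'
    simp only [List.getElem_map, List.getElem_range]
    have hkE : k < (pvEdges n).length := by simpa using hk
    rw [pv_mat_cellR b (pv_edge_mem_R (List.getElem_mem hkE)).1
        (pv_edge_mem_R (List.getElem_mem hkE)).2]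
    exact pv_cell_edge b hkE
  rw [hmap, pv_val_bits _ b hb0 hb]

-- the guard equivalence: "canonical key already seen" ↔ "some relabeling encodes below bits"
theorem pv_guard {n c : Int} (hc0 : 0 ≤ c) (hcm : c < 2 ^ (pvEdges n).length) :
    (∃ b', 0 ≤ b' ∧ b' < c ∧ pvMK n (pvBuild n b') = pvMK n (pvBuild n c)) ↔
    (∃ p ∈ pvPerms n, pvEncB n (pvEIdx n) c p < c) := by
  constructor
  · rintro ⟨b', hb0, hbc, hmk⟩
    have hXorb : pvBuild n b' ∈ pvOrb n (pvBuild n c) :=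
      (pv_mk_eq_iff (pv_sh_build n b') (pv_sh_build n c)).mp hmk
    obtain ⟨p, hp, hact⟩ := List.mem_map.mp hXorb
    refine ⟨p, hp, ?_⟩
    rw [pv_encB_eq_encM c hp, ← pv_build_eq_mat, hact, pv_build_eq_mat,
        pv_encM_mat b' hb0 (by omega)]
    exact hbc
  · rintro ⟨p, hp, hlt⟩
    have hTact : pvT n (pvAct n (pvMat n c) p) := pv_T_act (pv_T_mat n c) hp
    have henc : pvEncB n (pvEIdx n) c p = pvEncM n (pvAct n (pvMat n c) p) :=
      pv_encB_eq_encM c hp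
    have hb0 : 0 ≤ pvEncB n (pvEIdx n) c p := by
      rw [henc]; exact (pv_encM_bounds hTact).1
    refine ⟨pvEncB n (pvEIdx n) c p, hb0, hlt, ?_⟩
    have hbuild' : pvBuild n (pvEncB n (pvEIdx n) c p) = pvAct n (pvBuild n c) p := by
      rw [pv_build_eq_mat, henc, pv_mat_encM hTact, pv_build_eq_mat]
    apply (pv_mk_eq_iff (pv_sh_build n _) (pv_sh_build n c)).mpr
    rw [hbuild']
    exact List.mem_map.mpr ⟨p, hp, rfl⟩

-- A's seen-set fold produces exactly B's stateless filter
theorem pv_loop (n : Int) (fuel : Nat) : ∀ (c : Int), 0 ≤ c →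
    c + fuel = 2 ^ (pvEdges n).length →
    ∀ (sA : PySem.Set (List (List Int))) (out : List (List (List Int))),
    (∀ X, X ∈ sA ↔ ∃ b', 0 ≤ b' ∧ b' < c ∧ X = pvMK n (pvBuild n b')) →
    ((PySem.List.pyRange c ((2:Int) ^ (pvEdges n).length) 1).foldl
      (fun st bits =>
        if PySem.Set.contains st.1 (pvMK n (pvBuild n bits)) then st
        else (PySem.Set.add st.1 (pvMK n (pvBuild n bits)), st.2 ++ [pvBuild n bits]))
      (sA, out)).2
    = out ++ (PySem.List.pyRange c ((2:Int) ^ (pvEdges n).length) 1).filterMap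
        (fun bits =>
          if (pvPerms n).all (fun p => decide (bits ≤ pvEncB n (pvEIdx n) bits p)) then
            some (pvMat n bits)
          else none) := by
  induction fuel with
  | zero =>
    intro c hc0 hce sA out hinv
    rw [PySem.List.pyRange_one_eq_nil (by omega)]
    simp
  | succ fuel ih =>
    intro c hc0 hce sA out hinv
    have hclt : c < 2 ^ (pvEdges n).length := by omega
    rw [PySem.List.pyRange_one_cons hclt, List.foldl_cons, List.filterMap_cons]
    have hmem : PySem.Set.contains sA (pvMK n (pvBuild n c)) = true ↔
        ∃ p ∈ pvPerms n, pvEncB n (pvEIdx n) c p < c := by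
      rw [PySem.Set.contains_iff, hinv, ← pv_guard hc0 hclt]
      constructor
      · rintro ⟨b', h1, h2, h3⟩; exact ⟨b', h1, h2, h3.symm⟩
      · rintro ⟨b', h1, h2, h3⟩; exact ⟨b', h1, h2, h3.symm⟩
    have hall : ((pvPerms n).all (fun p => decide (c ≤ pvEncB n (pvEIdx n) c p)) = true) ↔
        ¬ ∃ p ∈ pvPerms n, pvEncB n (pvEIdx n) c p < c := by
      simp only [List.all_eq_true, decide_eq_true_eq]
      constructor
      · rintro h ⟨p, hp, hlt⟩
        exact absurd hlt (not_lt.mpr (h p hp))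
      · intro h p hp
        by_contra hc
        exact h ⟨p, hp, by omega⟩
    by_cases hseen : ∃ p ∈ pvPerms n, pvEncB n (pvEIdx n) c p < c
    · rw [if_pos (hmem.mpr hseen), if_neg (fun h => (hall.mp h) hseen)]
      apply ih (c+1) (by omega) (by omega) sA out
      intro X
      rw [hinv]
      constructor
      · rintro ⟨b', h1, h2, h3⟩; exact ⟨b', h1, by omega, h3⟩
      · rintro ⟨b', h1, h2, h3⟩
        by_cases hbc : b' < c
        · exact ⟨b', h1, hbc, h3⟩
        · have hbceq : b' = c := by omega
          obtain ⟨b'', h4, h5, h6⟩ := (pv_guard hc0 hclt).mpr hseen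
          exact ⟨b'', h4, h5, by rw [h3, hbceq, ← h6]⟩
    · rw [if_neg (fun h => hseen (hmem.mp h)), if_pos (hall.mpr hseen)]
      have hinv' : ∀ X, X ∈ PySem.Set.add sA (pvMK n (pvBuild n c)) ↔
          ∃ b', 0 ≤ b' ∧ b' < c + 1 ∧ X = pvMK n (pvBuild n b') := by
        intro X
        rw [PySem.Set.mem_add, hinv]
        constructor
        · rintro (⟨b', h1, h2, h3⟩ | h3)
          · exact ⟨b', h1, by omega, h3⟩
          · exact ⟨c, hc0, by omega, h3⟩
        · rintro ⟨b', h1, h2, h3⟩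
          by_cases hbc : b' < c
          · exact Or.inl ⟨b', h1, hbc, h3⟩
          · exact Or.inr (by rw [h3, show b' = c by omega])
      rw [ih (c+1) (by omega) (by omega) _ _ hinv', pv_build_eq_mat]
      simp [List.append_assoc]

-- ===== VERDICT (by name: the statement is the Claim_ definition above) =====
theorem all_tournaments_canonical_spec : Claim_equal_all_tournaments_canonical := by
  intro n _
  unfold Spec_all_tournaments_canonical all_tournaments_canonical all_tournaments_canonical_alt
  have hpow0 : (0:Int) ≤ 2 ^ (pvEdges n).length := by positivity
  exact pv_loop n ((2:Int) ^ (pvEdges n).length).toNat 0 le_rfl (by omega)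
    PySem.Set.empty []
    (by
      intro X
      constructor
      · intro h
        simp [PySem.Set.empty] at h
      · rintro ⟨b', h1, h2, _⟩
        omega)
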